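-- pv_equiv track=rewrite | github.com/rixemre/project_scraper | scrape/build_lords_list.py | clean_titles
-- ===== SOURCE A (Python) =====
-- def clean_titles(titles: list[str]) -> list[str]:
--     blocked = ("Category:", "Template:", "File:", "User:", "Talk:", "Help:")
--     out = []
--     for t in titles:
--         if t.startswith(blocked):
--             continue
--         t = t.strip()
--         if t and t not in out:
--             out.append(t)
--     return sorted(out)
-- ===== SOURCE B (Python) =====
-- def clean_titles(titles: list[str]) -> list[str]:
--     blocked = ("Category:", "Template:", "File:", "User:", "Talk:", "Help:")
--     kept = []
--     for t in titles:
--         if t.startswith(blocked):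
--             continue
--         s = t.strip()
--         if s:
--             kept.append(s)
--     kept.sort()
--     out = []
--     for s in kept:
--         if not out or out[-1] != s:
--             out.append(s)
--     return out
-- ===== Notes on version B (the rewrite author's own statement) =====
-- stated objective: faster
-- what changed: A dedupes while building via an O(n) membership scan on the growing list and sorts at the end; B keeps all stripped titles, sorts first, then removes duplicates in one adjacent-comparison pass.
import Mathlib
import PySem

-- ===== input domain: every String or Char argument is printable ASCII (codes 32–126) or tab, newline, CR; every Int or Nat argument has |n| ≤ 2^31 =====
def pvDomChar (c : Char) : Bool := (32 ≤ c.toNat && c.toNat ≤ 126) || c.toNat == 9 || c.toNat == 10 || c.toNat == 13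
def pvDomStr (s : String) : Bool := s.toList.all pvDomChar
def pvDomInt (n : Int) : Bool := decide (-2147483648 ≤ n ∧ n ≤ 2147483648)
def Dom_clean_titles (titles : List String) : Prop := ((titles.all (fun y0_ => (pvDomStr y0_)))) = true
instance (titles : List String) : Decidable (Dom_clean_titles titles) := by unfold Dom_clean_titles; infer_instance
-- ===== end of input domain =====

-- B sorts the filtered stripped titles first and removes duplicates in one adjacent-comparison
-- pass, instead of A's membership-scan dedup while building followed by a final sort.


-- ===== PORT A =====
-- t.startswith(blocked) for the tuple of six prefixes (shared by both Pythons verbatim)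
def pvBlocked (t : String) : Bool :=
  PySem.Str.startswith t "Category:" || PySem.Str.startswith t "Template:" ||
  PySem.Str.startswith t "File:" || PySem.Str.startswith t "User:" ||
  PySem.Str.startswith t "Talk:" || PySem.Str.startswith t "Help:"

-- A's loop body: skip blocked, strip, append if non-empty and not already collected
def pvStepA (out : List String) (t : String) : List String :=
  if pvBlocked t then out
  else
    let t' := PySem.Str.strip t
    if t' ≠ "" ∧ t' ∉ out then out ++ [t'] else out

def clean_titles (titles : List String) : List String :=
  PySem.List.sorted (titles.foldl pvStepA []) (fun x => x) false

-- ===== PORT B =====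
-- B's first loop body: skip blocked, strip, append if non-empty
def pvStepB (kept : List String) (t : String) : List String :=
  if pvBlocked t then kept
  else
    let s := PySem.Str.strip t
    if s ≠ "" then kept ++ [s] else kept

-- B's second loop body: 'if not out or out[-1] != s: out.append(s)'
def pvAdjStep (out : List String) (s : String) : List String :=
  match out.getLast? with
  | none => out ++ [s]
  | some last => if last ≠ s then out ++ [s] else out

def clean_titles_alt (titles : List String) : List String :=
  let kept := titles.foldl pvStepB []
  let sortedK := PySem.List.sorted kept (fun x => x) false
  sortedK.foldl pvAdjStep []

-- ===== PRECONDITION & SPEC =====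
def Spec_clean_titles (titles : List String) (out : List String) : Prop := out = clean_titles_alt titles
instance (titles : List String) (out : List String) : Decidable (Spec_clean_titles titles out) := by unfold Spec_clean_titles; infer_instance

-- ===== CLAIM (what is proved, stated in full; the proofs are below) =====
def Claim_equal_clean_titles : Prop := ∀ (titles : List String), Dom_clean_titles titles → Spec_clean_titles titles (clean_titles titles)

-- ===== LEMMAS AND PROOFS =====

-- what both first loops keep from a title
def pvKeep (t : String) : Option String :=
  if pvBlocked t then none
  else if PySem.Str.strip t = "" then none else some (PySem.Str.strip t)

-- first-occurrence dedup step (what pvStepA does on a kept title)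
def pvDStep (out : List String) (s : String) : List String :=
  if s ∈ out then out else out ++ [s]

lemma foldA_eq (titles : List String) (acc : List String) :
    titles.foldl pvStepA acc = (titles.filterMap pvKeep).foldl pvDStep acc := by
  induction titles generalizing acc with
  | nil => rfl
  | cons t ts ih =>
    rw [List.foldl_cons, List.filterMap_cons]
    by_cases hb : pvBlocked t
    · rw [show pvKeep t = none from by simp [pvKeep, hb],
        show pvStepA acc t = acc from by simp [pvStepA, hb]]
      exact ih acc
    · by_cases hs : PySem.Str.strip t = ""
      · rw [show pvKeep t = none from by simp [pvKeep, hb, hs],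
          show pvStepA acc t = acc from by simp [pvStepA, hb, hs]]
        exact ih acc
      · rw [show pvKeep t = some (PySem.Str.strip t) from by simp [pvKeep, hb, hs],
          show pvStepA acc t = pvDStep acc (PySem.Str.strip t) from by
            by_cases hm : PySem.Str.strip t ∈ acc <;> simp [pvStepA, pvDStep, hb, hs, hm]]
        exact List.foldl_cons .. ▸ ih (pvDStep acc (PySem.Str.strip t))

lemma foldB_eq (titles : List String) (acc : List String) :
    titles.foldl pvStepB acc = acc ++ titles.filterMap pvKeep := by
  induction titles generalizing acc with
  | nil => simp
  | cons t ts ih =>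
    rw [List.foldl_cons, List.filterMap_cons]
    by_cases hb : pvBlocked t
    · rw [show pvKeep t = none from by simp [pvKeep, hb],
        show pvStepB acc t = acc from by simp [pvStepB, hb]]
      exact ih acc
    · by_cases hs : PySem.Str.strip t = ""
      · rw [show pvKeep t = none from by simp [pvKeep, hb, hs],
          show pvStepB acc t = acc from by simp [pvStepB, hb, hs]]
        exact ih acc
      · rw [show pvKeep t = some (PySem.Str.strip t) from by simp [pvKeep, hb, hs],
          show pvStepB acc t = acc ++ [PySem.Str.strip t] from by simp [pvStepB, hb, hs],
          ih]
        simp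

lemma mem_dfold (l : List String) (acc : List String) (x : String) :
    x ∈ l.foldl pvDStep acc ↔ x ∈ acc ∨ x ∈ l := by
  induction l generalizing acc with
  | nil => simp
  | cons s l ih =>
    rw [List.foldl_cons, ih]
    by_cases h : s ∈ acc
    · simp only [pvDStep, if_pos h, List.mem_cons]
      constructor
      · tauto
      · rintro (h1 | h1 | h1) <;> [tauto; (subst h1; tauto); tauto]
    · simp only [pvDStep, if_neg h, List.mem_append, List.mem_cons]
      tauto

lemma nodup_dfold (l : List String) (acc : List String) (h : acc.Nodup) :
    (l.foldl pvDStep acc).Nodup := by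
  induction l generalizing acc with
  | nil => exact h
  | cons s l ih =>
    rw [List.foldl_cons]
    apply ih
    by_cases hm : s ∈ acc
    · simpa [pvDStep, hm] using h
    · simp only [pvDStep, if_neg hm]
      exact List.Nodup.append h (List.nodup_singleton s) (by simpa using hm)

lemma le_getLast_of_pairwise_lt {l : List String} (h : l.Pairwise (· < ·))
    {a m : String} (ha : a ∈ l) (hm : l.getLast? = some m) : a ≤ m := by
  rcases List.eq_nil_or_concat l with rfl | ⟨l', b, rfl⟩
  · simp at ha
  · simp only [List.concat_eq_append] at h ha hm
    rw [List.getLast?_concat] at hm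
    cases hm
    rcases List.mem_append.mp ha with h1 | h1
    · exact le_of_lt ((List.pairwise_append.mp h).2.2 a h1 m (by simp))
    · simp_all

lemma adjfold (l : List String) (acc : List String)
    (hl : l.Pairwise (· ≤ ·)) (hacc : acc.Pairwise (· < ·))
    (hle : ∀ a ∈ acc, ∀ x ∈ l, a ≤ x) :
    (l.foldl pvAdjStep acc).Pairwise (· < ·) ∧
    (∀ x, x ∈ l.foldl pvAdjStep acc ↔ x ∈ acc ∨ x ∈ l) := by
  induction l generalizing acc with
  | nil => simpa using hacc
  | cons s l ih =>
    rw [List.foldl_cons]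
    have hsl : ∀ x ∈ l, s ≤ x := (List.pairwise_cons.mp hl).1
    have hl' : l.Pairwise (· ≤ ·) := (List.pairwise_cons.mp hl).2
    have hstep : pvAdjStep acc s = acc ++ [s] ∨ (pvAdjStep acc s = acc ∧ s ∈ acc) := by
      unfold pvAdjStep
      cases hg : acc.getLast? with
      | none => left; rfl
      | some last =>
        by_cases hne : last ≠ s
        · left; simp [hne]
        · right
          rw [not_ne_iff] at hne
          subst hne
          exact ⟨by simp, List.mem_of_getLast? hg⟩
    rcases hstep with hstep | ⟨hstep, hsmem⟩
    · rw [hstep]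
      have hpw : (acc ++ [s]).Pairwise (· < ·) := by
        refine List.pairwise_append.mpr ⟨hacc, List.pairwise_singleton _ _, ?_⟩
        intro a ha b hb
        rw [List.mem_singleton] at hb
        rw [hb]
        rcases lt_or_eq_of_le (hle a ha s (by simp)) with hlt | heq
        · exact hlt
        · exfalso
          cases hg : acc.getLast? with
          | none => rw [List.getLast?_eq_none_iff] at hg; subst hg; simp at ha
          | some m =>
            have h1 : s ≤ m := heq ▸ le_getLast_of_pairwise_lt hacc ha hg
            have h2 : m ≤ s := hle m (List.mem_of_getLast? hg) s (by simp)
            have hms : m = s := le_antisymm h2 h1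
            rw [show pvAdjStep acc s = acc from by simp [pvAdjStep, hg, hms]] at hstep
            simp at hstep
      have hrec := ih (acc ++ [s]) hl' hpw (by
        intro a ha x hx
        rcases List.mem_append.mp ha with h | h
        · exact hle a h x (List.mem_cons_of_mem _ hx)
        · rw [List.mem_singleton] at h
          rw [h]
          exact hsl x hx)
      refine ⟨hrec.1, fun x => ?_⟩
      rw [hrec.2]
      simp only [List.mem_append, List.mem_cons]
      tauto
    · rw [hstep]
      have hrec := ih acc hl' hacc (by
        intro a ha x hx
        exact hle a ha x (List.mem_cons_of_mem _ hx))
      refine ⟨hrec.1, fun x => ?_⟩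
      rw [hrec.2]
      simp only [List.mem_cons]
      constructor
      · tauto
      · rintro (h | h | h) <;> [tauto; (subst h; tauto); tauto]

-- ===== VERDICT (by name: the statement is the Claim_ definition above) =====
theorem clean_titles_spec : Claim_equal_clean_titles := by
  intro titles _
  unfold Spec_clean_titles clean_titles clean_titles_alt
  rw [foldA_eq, foldB_eq]
  simp only [List.nil_append]
  set K := titles.filterMap pvKeep with hK
  have hsortK : (PySem.List.sorted K (fun x => x) false).Pairwise (· ≤ ·) :=
    PySem.List.sorted_pairwise K (fun x => x)
  have hadj := adjfold (PySem.List.sorted K (fun x => x) false) [] hsortK (by simp) (by simp)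
  have hmemR : ∀ x, x ∈ (PySem.List.sorted K (fun x => x) false).foldl pvAdjStep [] ↔ x ∈ K := by
    intro x
    rw [hadj.2 x]
    simp [PySem.List.mem_sorted]
  have hmemL : ∀ x, x ∈ K.foldl pvDStep [] ↔ x ∈ K := by
    intro x; rw [mem_dfold]; simp
  have hnodL : (K.foldl pvDStep []).Nodup := nodup_dfold K [] (by simp)
  have hnodR : ((PySem.List.sorted K (fun x => x) false).foldl pvAdjStep []).Nodup := hadj.1.nodup
  have hperm : ((PySem.List.sorted K (fun x => x) false).foldl pvAdjStep []).Perm (K.foldl pvDStep []) :=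
    (List.perm_ext_iff_of_nodup hnodR hnodL).mpr (fun x => (hmemR x).trans (hmemL x).symm)
  exact PySem.List.sorted_eq_of_perm_of_pairwise_lt _ _ (fun x => x) hperm hadj.1
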